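-- pv_equiv track=rewrite | github.com/ynkjohn/newsbot | interactions/question_handler.py | _is_single_headline_question
-- ===== SOURCE A (Python) =====
-- def _is_single_headline_question(question: str) -> bool:
--     lowered = (question or "").lower()
--     patterns = (
--         "principal noticia",
--         "noticia principal",
--         "noticia mais importante",
--         "mais importante da noite",
--         "maior destaque",
--         "destaque da noite",
--     )
--     return any(pattern in lowered for pattern in patterns)
-- ===== SOURCE B (Python) =====
-- def _is_single_headline_question(question: str) -> bool:
--     lowered = (question or "").lower()
--     patterns = (
--         "principal noticia",
--         "noticia principal",
--         "noticia mais importante",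
--         "mais importante da noite",
--         "maior destaque",
--         "destaque da noite",
--     )
--     for i in range(len(lowered)):
--         for pattern in patterns:
--             if lowered.startswith(pattern, i):
--                 return True
--     return False
-- ===== Notes on version B (the rewrite author's own statement) =====
-- stated objective: alternative
-- what changed: A runs six independent whole-text substring searches, one per phrase; B makes a single left-to-right scan over positions and at each position tests whether any of the six phrases starts there, so the text is traversed once.
import Mathlib
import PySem

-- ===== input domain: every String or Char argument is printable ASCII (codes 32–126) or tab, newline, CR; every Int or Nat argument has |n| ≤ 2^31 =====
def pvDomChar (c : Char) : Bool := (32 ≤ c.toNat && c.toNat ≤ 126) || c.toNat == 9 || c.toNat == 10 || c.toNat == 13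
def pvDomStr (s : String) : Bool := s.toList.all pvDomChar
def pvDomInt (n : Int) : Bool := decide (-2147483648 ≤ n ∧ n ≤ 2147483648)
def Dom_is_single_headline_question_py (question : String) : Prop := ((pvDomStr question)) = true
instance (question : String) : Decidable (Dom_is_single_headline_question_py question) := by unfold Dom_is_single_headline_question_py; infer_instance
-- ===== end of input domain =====

-- B replaces A's six independent substring ('in') searches by a single left-to-right
-- scan over positions, testing at each position whether any phrase starts there (alternative decomposition).


-- the six phrase literals, shared verbatim by both Pythons
def pvPatterns : List String :=
  ["principal noticia", "noticia principal", "noticia mais importante",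
   "mais importante da noite", "maior destaque", "destaque da noite"]

-- ===== PORT A =====
-- lowered = (question or "").lower(); any(pattern in lowered for pattern in patterns)
def is_single_headline_question_py (question : String) : Bool :=
  let lowered := PySem.Str.lower (if question = "" then "" else question)
  pvPatterns.any (fun pattern => PySem.Str.isIn pattern lowered)

-- ===== PORT B =====
-- for i in range(len(lowered)): positions ↔ successive suffixes; lowered.startswith(pattern, i)
def pvScan (cs : List Char) : Bool :=
  match cs with
  | [] => false
  | c :: rest =>
    if pvPatterns.any (fun pattern => PySem.Chars.startswith (c :: rest) pattern.toList)
    then true else pvScan rest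

def is_single_headline_question_py_alt (question : String) : Bool :=
  let lowered := PySem.Str.lower (if question = "" then "" else question)
  pvScan lowered.toList

-- ===== PRECONDITION & SPEC =====
def Spec_is_single_headline_question_py (question : String) (out : Bool) : Prop := out = is_single_headline_question_py_alt question
instance (question : String) (out : Bool) : Decidable (Spec_is_single_headline_question_py question out) := by unfold Spec_is_single_headline_question_py; infer_instance

-- ===== CLAIM (what is proved, stated in full; the proofs are below) =====
def Claim_equal_is_single_headline_question_py : Prop := ∀ (question : String), Dom_is_single_headline_question_py question → Spec_is_single_headline_question_py question (is_single_headline_question_py question)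

-- ===== LEMMAS AND PROOFS =====

lemma pvPatterns_ne_nil : ∀ p ∈ pvPatterns, p.toList ≠ [] := by decide

lemma pvScan_iff (cs : List Char) :
    pvScan cs = true ↔ ∃ p ∈ pvPatterns, ∃ j, p.toList <+: cs.drop j := by
  induction cs with
  | nil =>
    rw [pvScan]
    simp only [Bool.false_eq_true, false_iff]
    rintro ⟨p, hp, j, hpre⟩
    simp only [List.drop_nil, List.prefix_nil] at hpre
    exact pvPatterns_ne_nil p hp hpre
  | cons c rest ih =>
    rw [pvScan]
    by_cases h : pvPatterns.any (fun pattern => PySem.Chars.startswith (c :: rest) pattern.toList) = true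
    · rw [if_pos h]
      simp only [true_iff]
      rw [List.any_eq_true] at h
      obtain ⟨p, hp, hs⟩ := h
      exact ⟨p, hp, 0, (PySem.Chars.startswith_iff _ _).mp hs⟩
    · rw [if_neg h, ih]
      constructor
      · rintro ⟨p, hp, j, hpre⟩
        exact ⟨p, hp, j + 1, by simpa using hpre⟩
      · rintro ⟨p, hp, j, hpre⟩
        cases j with
        | zero =>
          exact absurd (List.any_eq_true.mpr ⟨p, hp, (PySem.Chars.startswith_iff _ _).mpr (by simpa using hpre)⟩) h
        | succ j => exact ⟨p, hp, j, by simpa using hpre⟩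

-- ===== VERDICT (by name: the statement is the Claim_ definition above) =====
theorem is_single_headline_question_py_spec : Claim_equal_is_single_headline_question_py := by
  intro question _
  unfold Spec_is_single_headline_question_py is_single_headline_question_py is_single_headline_question_py_alt
  rw [Bool.eq_iff_iff]
  simp only [List.any_eq_true, pvScan_iff, PySem.Str.isIn_iff_infix]
  constructor
  · rintro ⟨p, hp, hinf⟩
    exact ⟨p, hp, (PySem.Chars.exists_prefix_drop_iff_isIn _ _).mpr
      ((PySem.Chars.isIn_iff_infix _ _).mpr hinf)⟩
  · rintro ⟨p, hp, hex⟩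
    exact ⟨p, hp, (PySem.Chars.isIn_iff_infix _ _).mp
      ((PySem.Chars.exists_prefix_drop_iff_isIn _ _).mp hex)⟩
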